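-- pv_equiv track=rewrite | github.com/keith-packard/aoc-2019 | big.py | int_to_big
-- ===== SOURCE A (Python) =====
-- def int_to_big(i):
--     if i < 0:
--         r = "-"
--         i = -i
--     else:
--         r = "+"
--     while True:
--         r += chr(ord('0') + i % 10)
--         i //= 10
--         if i == 0:
--             break
--     return r
-- ===== SOURCE B (Python) =====
-- def int_to_big(i):
--     sign = '-' if i < 0 else '+'
--     return sign + str(abs(i))[::-1]
-- ===== Notes on version B (the rewrite author's own statement) =====
-- stated objective: simpler
-- what changed: Replaces the manual do-while modulo/floor-division digit loop with str(abs(i)) for digit generation and a [::-1] slice for the least-significant-first order.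
import Mathlib
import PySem

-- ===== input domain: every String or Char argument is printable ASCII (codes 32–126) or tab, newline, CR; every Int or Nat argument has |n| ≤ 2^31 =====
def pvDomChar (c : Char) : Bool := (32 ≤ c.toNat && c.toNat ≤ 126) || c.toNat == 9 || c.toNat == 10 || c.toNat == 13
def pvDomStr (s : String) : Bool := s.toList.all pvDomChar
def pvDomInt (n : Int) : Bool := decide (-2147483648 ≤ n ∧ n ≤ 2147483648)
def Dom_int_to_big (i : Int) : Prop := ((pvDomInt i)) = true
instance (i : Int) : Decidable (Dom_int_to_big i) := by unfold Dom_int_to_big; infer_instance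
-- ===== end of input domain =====

-- B replaces A's manual modulo/floor-division digit loop by str(abs(i)) reversed with a slice (simpler).

-- ===== PORT A =====
-- the 'while True' digit loop of A; called with the (nonnegative) magnitude, emits digits LSB first
def pvALoop (n : Nat) : List Char :=
  let c := Char.ofNat ('0'.toNat + n % 10)
  if h : n / 10 = 0 then [c] else c :: pvALoop (n / 10)
decreasing_by exact Nat.div_lt_self (by omega) (by norm_num)

def int_to_big (i : Int) : String :=
  if i < 0 then "-" ++ String.ofList (pvALoop (-i).toNat)
  else "+" ++ String.ofList (pvALoop i.toNat)

-- ===== PORT B =====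
def int_to_big_alt (i : Int) : String :=
  (if i < 0 then "-" else "+") ++
    ((PySem.Str.slice? (PySem.Int.toStr |i|) none none (-1)).getD (PySem.Int.toStr |i|))
    -- s[::-1]; step = -1 is never none, getD is unreachable

-- ===== PRECONDITION & SPEC =====
def Spec_int_to_big (i : Int) (out : String) : Prop := out = int_to_big_alt i
instance (i : Int) (out : String) : Decidable (Spec_int_to_big i out) := by unfold Spec_int_to_big; infer_instance

-- ===== CLAIM (what is proved, stated in full; the proofs are below) =====
def Claim_equal_int_to_big : Prop := ∀ (i : Int), Dom_int_to_big i → Spec_int_to_big i (int_to_big i)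

-- ===== LEMMAS AND PROOFS =====
lemma digitChar_eq (d : Nat) (h : d < 10) : Nat.digitChar d = Char.ofNat (48 + d) := by
  interval_cases d <;> rfl

lemma toDigitsCore_eq_loop (f n : Nat) (l : List Char) (h : n < f) :
    Nat.toDigitsCore 10 f n l = (pvALoop n).reverse ++ l := by
  induction f generalizing n l with
  | zero => omega
  | succ f ih =>
    rw [Nat.toDigitsCore, pvALoop]
    have hd : Nat.digitChar (n % 10) = Char.ofNat ('0'.toNat + n % 10) :=
      digitChar_eq _ (Nat.mod_lt _ (by norm_num))
    by_cases h0 : n / 10 = 0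
    · simp [h0, hd]
    · have hlt : n / 10 < f := by
        have := Nat.div_lt_self (n := n) (by omega) (by norm_num : 1 < 10)
        omega
      simp [h0, ih _ _ hlt, hd]

lemma toDigits_eq_loop (n : Nat) : Nat.toDigits 10 n = (pvALoop n).reverse := by
  simpa using toDigitsCore_eq_loop (n + 1) n [] (by omega)

lemma altMag_eq (n : Nat) :
    ((PySem.Str.slice? (PySem.Int.toStr (n : Int)) none none (-1)).getD
      (PySem.Int.toStr (n : Int))) = String.ofList (pvALoop n) := by
  rw [PySem.Str.slice?_none_none_neg_one, Option.getD_some]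
  have h1 : (PySem.Int.toStr (n : Int)).toList = Nat.toDigits 10 n := by
    rw [PySem.Int.toList_toStr]
    simp [PySem.Int.toChars]
  rw [h1, toDigits_eq_loop, List.reverse_reverse]

-- ===== VERDICT (by name: the statement is the Claim_ definition above) =====
theorem int_to_big_spec : Claim_equal_int_to_big := by
  intro i _
  unfold Spec_int_to_big int_to_big int_to_big_alt
  by_cases h : i < 0
  · have habs : |i| = ((-i).toNat : Int) := by
      rw [abs_of_neg h]; omega
    simp only [h, if_pos, habs, altMag_eq]
  · have habs : |i| = (i.toNat : Int) := by
      rw [abs_of_nonneg (by omega)]; omega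
    simp only [h, habs, altMag_eq, if_false]
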